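-- pv_equiv track=rewrite | github.com/leobeuque/Projet-d-ordonnancement | Algorithme métaheuristique tabou ordonnancement version finale.py | ListeInitiale
-- ===== SOURCE A (Python) =====
-- def ListeInitiale(tableDeComp): #On convertit une table de Compétence en une première liste de priorité en respectant le critère de priorité suivant: "prochaine op = i prioritaire par rapport à prochaine op = j si i<j"
--     n = len(tableDeComp)
--     J =[]
--     for patient in range(n):
--         J.append(len(tableDeComp[patient])) # nb d'opérations par patient
--     # J = [5, 3, 2, 5, 5, 3, 4, 4, 3, 4]
--
--     def second(elem):
--         return elem[1]
--     readyop = sorted([(i, j) for i in range(1, n+1) for j in range(1, J[i-1]+1)], key = second) # opérations prêtes à être exécutées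
--     return readyop
-- ===== SOURCE B (Python) =====
-- def ListeInitiale(tableDeComp):
--     # Bucket construction: emit operations column by column (j = 1, 2, ...),
--     # scanning patients in order inside each column -- no sort needed.
--     n = len(tableDeComp)
--     lengths = [len(row) for row in tableDeComp]
--     longest = 0
--     for L in lengths:
--         longest = max(longest, L)
--     readyop = []
--     for j in range(1, longest + 1):
--         for i in range(1, n + 1):
--             if lengths[i - 1] >= j:
--                 readyop.append((i, j))
--     return readyop
-- ===== Notes on version B (the rewrite author's own statement) =====
-- stated objective: faster
-- what changed: B builds the result directly in output order, column by column (for each operation index j it scans patients in order and appends (i,j)), instead of generating all pairs row by row and stable-sorting them by operation index; the sort disappears.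
import Mathlib
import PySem

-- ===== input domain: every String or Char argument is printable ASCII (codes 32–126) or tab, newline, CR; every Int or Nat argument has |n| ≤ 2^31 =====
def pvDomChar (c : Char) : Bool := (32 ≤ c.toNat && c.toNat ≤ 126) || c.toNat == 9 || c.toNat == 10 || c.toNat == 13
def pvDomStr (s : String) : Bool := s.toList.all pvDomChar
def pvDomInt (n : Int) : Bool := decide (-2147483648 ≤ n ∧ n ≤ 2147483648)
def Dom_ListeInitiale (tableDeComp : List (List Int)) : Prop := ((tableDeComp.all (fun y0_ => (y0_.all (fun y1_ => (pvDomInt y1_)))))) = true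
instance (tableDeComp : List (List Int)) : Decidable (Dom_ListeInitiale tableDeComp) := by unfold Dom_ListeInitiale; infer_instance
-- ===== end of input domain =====

-- B builds the output column by column (per operation index j) instead of stable-sorting all pairs; return value proved equal.

-- ===== PORT A =====
def ListeInitiale (tableDeComp : List (List Int)) : List (Int × Int) :=
  let n : Int := (tableDeComp.length : Int)
  let J : List Int :=
    (PySem.List.pyRange 0 n).foldl
      (fun acc patient => acc ++ [((PySem.List.pyGetD tableDeComp patient []).length : Int)]) []
  PySem.List.sorted
    ((PySem.List.pyRange 1 (n + 1)).flatMap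
      (fun i => (PySem.List.pyRange 1 (PySem.List.pyGetD J (i - 1) 0 + 1)).map (fun j => (i, j))))
    (fun e => e.2) false

-- ===== PORT B =====
def ListeInitiale_alt (tableDeComp : List (List Int)) : List (Int × Int) :=
  let n : Int := (tableDeComp.length : Int)
  let lengths : List Int := tableDeComp.map (fun row => (row.length : Int))
  let longest : Int := lengths.foldl (fun acc L => max acc L) 0
  (PySem.List.pyRange 1 (longest + 1)).foldl
    (fun out j =>
      (PySem.List.pyRange 1 (n + 1)).foldl
        (fun out i => if PySem.List.pyGetD lengths (i - 1) 0 ≥ j then out ++ [(i, j)] else out)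
        out)
    []

-- ===== PRECONDITION & SPEC =====
def Spec_ListeInitiale (tableDeComp : List (List Int)) (out : List (Int × Int)) : Prop := out = ListeInitiale_alt tableDeComp
instance (tableDeComp : List (List Int)) (out : List (Int × Int)) : Decidable (Spec_ListeInitiale tableDeComp out) := by unfold Spec_ListeInitiale; infer_instance

-- ===== CLAIM (what is proved, stated in full; the proofs are below) =====
def Claim_equal_ListeInitiale : Prop := ∀ (tableDeComp : List (List Int)), Dom_ListeInitiale tableDeComp → Spec_ListeInitiale tableDeComp (ListeInitiale tableDeComp)

-- ===== LEMMAS AND PROOFS =====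

-- row i (0-based) of the row-major pair list: [(i+1, 1), …, (i+1, f i)]
def pvRow (f : Nat → Nat) (i : Nat) : List (Int × Int) :=
  (List.range (f i)).map (fun (j : Nat) => ((i : Int) + 1, (j : Int) + 1))

-- column j (0-based) over the first n rows: [(i+1, j+1) | i < n, j < f i]
def pvCol (f : Nat → Nat) (n j : Nat) : List (Int × Int) :=
  ((List.range n).filter (fun i => decide (j < f i))).map (fun (i : Nat) => ((i : Int) + 1, (j : Int) + 1))

def pvR (f : Nat → Nat) (n : Nat) : List (Int × Int) := (List.range n).flatMap (pvRow f)
def pvC (f : Nat → Nat) (n M : Nat) : List (Int × Int) := (List.range M).flatMap (pvCol f n)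

-- columns with the new row's first t entries already inserted
def pvCmix (f : Nat → Nat) (n M t : Nat) (a : Int) : List (Int × Int) :=
  (List.range M).flatMap (fun j => pvCol f n j ++ (if j < t then [(a, (j : Int) + 1)] else []))

def pvIns (x : Int × Int) (acc : List (Int × Int)) : List (Int × Int) :=
  PySem.List.insertBy (fun a b => decide (a.2 < b.2)) x acc

theorem pv_insertBy_middle {α : Type} (before : α → α → Bool) (x : α) :
    ∀ (u v : List α), (∀ y ∈ u, before x y = false) → (∀ y ∈ v, before x y = true) →
      PySem.List.insertBy before x (u ++ v) = u ++ x :: v := by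
  intro u
  induction u with
  | nil =>
    intro v _ h2
    cases v with
    | nil => rfl
    | cons b bs =>
      simp [PySem.List.insertBy, h2 b (by simp)]
  | cons a u ih =>
    intro v h1 h2
    have ha : before x a = false := h1 a (by simp)
    simp only [List.cons_append, PySem.List.insertBy, ha, Bool.false_eq_true, if_false]
    rw [ih v (fun y hy => h1 y (by simp [hy])) h2]

theorem pv_sorted_append {α κ : Type} [LinearOrder κ] (xs ys : List α) (key : α → κ) :
    PySem.List.sorted (xs ++ ys) key false =
      ys.foldl (fun acc x => PySem.List.insertBy (fun a b => decide (key a < key b)) x acc)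
        (PySem.List.sorted xs key false) := by
  rw [PySem.List.sorted_eq_foldl_insertBy, PySem.List.sorted_eq_foldl_insertBy, List.foldl_append]

theorem pv_snd_mem_block (f : Nat → Nat) (n t : Nat) (a : Int) (j : Nat) (y : Int × Int)
    (hy : y ∈ pvCol f n j ++ (if j < t then [(a, (j : Int) + 1)] else [])) :
    y.2 = (j : Int) + 1 := by
  rcases List.mem_append.1 hy with h | h
  · simp only [pvCol, List.mem_map] at h
    obtain ⟨i, _, rfl⟩ := h
    rfl
  · split at h <;> simp_all

theorem pv_insert_step (f : Nat → Nat) (n M t : Nat) (a : Int) (ht : t < M) :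
    pvIns (a, (t : Int) + 1) (pvCmix f n M t a) = pvCmix f n M (t + 1) a := by
  have hM : M = (t + 1) + (M - (t + 1)) := by omega
  have hsplit : List.range M
      = List.range (t + 1) ++ (List.range (M - (t + 1))).map (fun x => (t + 1) + x) := by
    conv_lhs => rw [hM, List.range_add]
  unfold pvCmix
  rw [hsplit, List.flatMap_append, List.flatMap_append]
  set g := fun j => pvCol f n j ++ (if j < t then [(a, (j : Int) + 1)] else []) with hg
  set g' := fun j => pvCol f n j ++ (if j < t + 1 then [(a, (j : Int) + 1)] else []) with hg'
  have hB : ((List.range (M - (t + 1))).map (fun x => (t + 1) + x)).flatMap g'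
      = ((List.range (M - (t + 1))).map (fun x => (t + 1) + x)).flatMap g := by
    apply List.flatMap_congr
    intro j hj
    simp only [List.mem_map, List.mem_range] at hj
    obtain ⟨x, _, rfl⟩ := hj
    have h1 : ¬ (t + 1 + x < t) := by omega
    have h2 : ¬ (t + 1 + x < t + 1) := by omega
    simp only [hg, hg', h1, h2, if_false]
  have hA : (List.range (t + 1)).flatMap g'
      = (List.range (t + 1)).flatMap g ++ [(a, (t : Int) + 1)] := by
    rw [List.range_succ, List.flatMap_append, List.flatMap_append]
    have hlt : ∀ j ∈ List.range t, g' j = g j := by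
      intro j hj
      simp only [List.mem_range] at hj
      have h2 : j < t + 1 := by omega
      simp only [hg, hg', hj, h2, if_true]
    rw [List.flatMap_congr hlt]
    simp only [List.flatMap_cons, List.flatMap_nil, List.append_nil, hg, hg']
    have h2 : t < t + 1 := by omega
    simp [h2]
  rw [hB, hA]
  unfold pvIns
  rw [pv_insertBy_middle _ _ _ _ ?hu ?hv]
  · simp
  case hu =>
    intro y hy
    simp only [List.mem_flatMap, List.mem_range] at hy
    obtain ⟨j, hj, hyj⟩ := hy
    have hsnd := pv_snd_mem_block f n t a j y hyj
    simp only [decide_eq_false_iff_not, not_lt, hsnd]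
    have : (j : Int) ≤ (t : Int) := by exact_mod_cast Nat.lt_succ_iff.mp hj
    omega
  case hv =>
    intro y hy
    simp only [List.mem_flatMap, List.mem_map, List.mem_range] at hy
    obtain ⟨j, ⟨x, hx, rfl⟩, hyj⟩ := hy
    have hsnd := pv_snd_mem_block f n t a _ y hyj
    simp only [decide_eq_true_eq, hsnd]
    push_cast
    omega

theorem pv_insert_row (f : Nat → Nat) (n M : Nat) (a : Int) :
    ∀ t, t ≤ M →
      ((List.range t).map (fun (j : Nat) => (a, (j : Int) + 1))).foldl (fun acc x => pvIns x acc) (pvC f n M)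
        = pvCmix f n M t a := by
  intro t
  induction t with
  | zero =>
    intro _
    simp [pvC, pvCmix]
  | succ t ih =>
    intro h
    rw [List.range_succ, List.map_append, List.foldl_append, ih (by omega)]
    simp only [List.map_cons, List.map_nil, List.foldl_cons, List.foldl_nil]
    exact pv_insert_step f n M t a (by omega)

theorem pv_cmix_full (f : Nat → Nat) (n M : Nat) :
    pvCmix f n M (f n) ((n : Int) + 1) = pvC f (n + 1) M := by
  unfold pvCmix pvC
  apply List.flatMap_congr
  intro j _
  unfold pvCol
  rw [List.range_succ, List.filter_append, List.map_append]
  congr 1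
  by_cases h : j < f n <;> simp [h]

theorem pv_main (f : Nat → Nat) :
    ∀ n M, (∀ i, i < n → f i ≤ M) →
      PySem.List.sorted (pvR f n) (fun e => e.2) false = pvC f n M := by
  intro n
  induction n with
  | zero =>
    intro M _
    simp [pvR, pvC, pvCol, PySem.List.sorted]
  | succ n ih =>
    intro M hM
    have hrow : pvR f (n + 1) = pvR f n ++ pvRow f n := by
      simp [pvR, List.range_succ]
    rw [hrow, pv_sorted_append, ih M (fun i hi => hM i (by omega))]
    have : (pvRow f n).foldl
        (fun acc x => PySem.List.insertBy (fun a b => decide (a.2 < b.2)) x acc) (pvC f n M)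
        = pvCmix f n M (f n) ((n : Int) + 1) := by
      have := pv_insert_row f n M ((n : Int) + 1) (f n) (hM n (by omega))
      simpa [pvRow, pvIns] using this
    rw [this, pv_cmix_full]

-- range helper: Python range(1, n+1)
theorem pv_pyRange_one_natCast (n : Nat) :
    PySem.List.pyRange 1 ((n : Int) + 1) = (List.range n).map (fun (k : Nat) => (k : Int) + 1) := by
  induction n with
  | zero =>
    simp [PySem.List.pyRange]
  | succ n ih =>
    have h1 : (1 : Int) ≤ (n : Int) + 1 := by omega
    have : ((n + 1 : Nat) : Int) + 1 = ((n : Int) + 1) + 1 := by push_cast; ring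
    rw [this, PySem.List.pyRange_one_succ_right h1, ih, List.range_succ]
    simp

theorem pv_map_getD_range {α β : Type} (l : List α) (g : α → β) (d : α) :
    (List.range l.length).map (fun k => g (l.getD k d)) = l.map g := by
  apply List.ext_getElem
  · simp
  · intro k h1 h2
    simp only [List.getElem_map, List.getElem_range]
    rw [List.getD_eq_getElem l d (by simpa using h1)]

-- ===== VERDICT (by name: the statement is the Claim_ definition above) =====
theorem ListeInitiale_spec : Claim_equal_ListeInitiale := by
  intro tds _
  unfold Spec_ListeInitiale ListeInitiale ListeInitiale_alt
  simp only []
  set n := tds.length with hn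
  set f : Nat → Nat := fun i => (tds.getD i []).length with hf
  set Ks : List Int := (List.range n).map (fun k => ((f k : Nat) : Int)) with hKs
  -- the J list A builds and the lengths list B builds are both Ks
  have hJ : (PySem.List.pyRange 0 (n : Int)).foldl
      (fun acc patient => acc ++ [((PySem.List.pyGetD tds patient []).length : Int)]) [] = Ks := by
    rw [PySem.List.foldl_append_singleton_eq_map, PySem.List.pyRange_zero_natCast, List.map_map]
    simp [hKs, Function.comp_def, PySem.List.pyGetD_natCast, hf]
  have hlens : tds.map (fun row => (row.length : Int)) = Ks := by
    rw [hKs]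
    exact (pv_map_getD_range tds (fun r => (r.length : Int)) []).symm
  have hKget : ∀ k, k < n → Ks.getD k 0 = ((f k : Nat) : Int) := by
    intro k hk
    rw [hKs, List.getD_eq_getElem _ _ (by simpa using hk)]
    simp
  rw [hJ, hlens]
  -- A's pair list is the row-major list pvR f n
  have hA : (PySem.List.pyRange 1 ((n : Int) + 1)).flatMap
      (fun i => (PySem.List.pyRange 1 (PySem.List.pyGetD Ks (i - 1) 0 + 1)).map (fun j => (i, j)))
      = pvR f n := by
    rw [pv_pyRange_one_natCast, List.flatMap_map]
    apply List.flatMap_congr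
    intro k hk
    simp only [List.mem_range] at hk
    have h1 : ((k : Int) + 1 - 1) = (k : Int) := by ring
    rw [h1, PySem.List.pyGetD_natCast, hKget k hk, pv_pyRange_one_natCast (f k), List.map_map]
    simp [pvRow, Function.comp_def]
  rw [hA]
  -- B's longest and its Nat mirror M
  set L0 : Int := Ks.foldl (fun acc L => max acc L) 0 with hL0
  have hL0max : 0 ≤ List.foldl max 0 Ks ∧ ∀ y ∈ Ks, y ≤ List.foldl max 0 Ks :=
    PySem.List.le_foldl_max Ks 0
  have h0 : 0 ≤ L0 := hL0max.1
  set M := L0.toNat with hM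
  have hML : (M : Int) = L0 := Int.toNat_of_nonneg h0
  have hbound : ∀ i, i < n → f i ≤ M := by
    intro i hi
    have hmem : ((f i : Nat) : Int) ∈ Ks := by
      rw [hKs]
      exact List.mem_map.2 ⟨i, List.mem_range.2 hi, rfl⟩
    have h2 : ((f i : Nat) : Int) ≤ (M : Int) := by
      rw [hML]
      exact hL0max.2 _ hmem
    exact_mod_cast h2
  -- B's double loop is the column-major list pvC f n M
  have hinner : ∀ (out : List (Int × Int)) (j : Int),
      (PySem.List.pyRange 1 ((n : Int) + 1)).foldl
        (fun out i => if PySem.List.pyGetD Ks (i - 1) 0 ≥ j then out ++ [(i, j)] else out) out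
      = out ++ ((PySem.List.pyRange 1 ((n : Int) + 1)).filter
          (fun i => decide (PySem.List.pyGetD Ks (i - 1) 0 ≥ j))).map (fun i => (i, j)) := by
    intro out j
    exact PySem.List.foldl_append_ite _ _ _ _
  rw [PySem.List.foldl_congr_mem _ _
      (fun out j => out ++ ((PySem.List.pyRange 1 ((n : Int) + 1)).filter
          (fun i => decide (PySem.List.pyGetD Ks (i - 1) 0 ≥ j))).map (fun i => (i, j)))
      _ (fun out j _ => hinner out j),
    PySem.List.foldl_append_eq_flatMap, List.nil_append]
  have hB : (PySem.List.pyRange 1 (L0 + 1)).flatMap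
      (fun j => ((PySem.List.pyRange 1 ((n : Int) + 1)).filter
          (fun i => decide (PySem.List.pyGetD Ks (i - 1) 0 ≥ j))).map (fun i => (i, j)))
      = pvC f n M := by
    rw [← hML, pv_pyRange_one_natCast M, List.flatMap_map]
    apply List.flatMap_congr
    intro j0 _
    rw [pv_pyRange_one_natCast n, List.filter_map]
    have hp : ∀ k ∈ List.range n,
        ((fun i => decide (PySem.List.pyGetD Ks (i - 1) 0 ≥ (j0 : Int) + 1)) ∘ (fun (k : Nat) => (k : Int) + 1)) k
        = (fun k => decide (j0 < f k)) k := by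
      intro k hk
      simp only [List.mem_range] at hk
      have h1 : ((k : Int) + 1 - 1) = (k : Int) := by ring
      simp only [Function.comp_apply, h1, PySem.List.pyGetD_natCast, hKget k hk]
      simp only [decide_eq_decide]
      constructor <;> intro h <;> [exact_mod_cast (by omega : (j0 : Int) < (f k : Int)); omega]
    rw [List.filter_congr hp, List.map_map, pvCol]
    simp [Function.comp_def]
  rw [hB]
  exact pv_main f n M hbound
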